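-- pv_equiv track=rewrite | github.com/sandyz1000/algo_LC_GFG | sequence/matrix/cell_queen_move.py | numberof_position_method
-- ===== SOURCE A (Python) =====
-- def numberof_position_method(n, k, x, y, obst_posx, obst_posy):
--     """
--     Return the number of position a Queen can move.
--     :param n: int
--     :param k: int
--     :param x: int
--     :param y: int
--     :param obst_posx: list(int)
--     :param obst_posy: list(int)
--     :return:
--     """
--     # d11, d12, d21, d22 are for diagonal distances.
--     # r1, r2 are for vertical distance.
--     # c1, c2 are for horizontal distance.
--
--     d11 = min(x - 1, y - 1)
--     d12 = min(n - x, n - y)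
--     d21 = min(n - x, y - 1)
--     d22 = min(x - 1, n - y)
--
--     r1 = y - 1
--     r2 = n - y
--     c1 = x - 1
--     c2 = n - x
--
--     # For each obstacle find the minimum distance. If obstacle is present in any direction,
--     # distance will be updated.
--     for i in range(k):
--         if x > obst_posx[i] and y > obst_posy[i] and x - obst_posx[i] == y - obst_posy[i]:
--             d11 = min(d11, x - obst_posx[i] - 1)
--
--         if obst_posx[i] > x and obst_posy[i] > y and obst_posx[i] - x == obst_posy[i] - y:
--             d12 = min(d12, obst_posx[i] - x - 1)
--
--         if obst_posx[i] > x and y > obst_posy[i] and obst_posx[i] - x == y - obst_posy[i]: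
--             d21 = min(d21, obst_posx[i] - x - 1)
--
--         if x > obst_posx[i] and obst_posy[i] > y and x - obst_posx[i] == obst_posy[i] - y:
--             d22 = min(d22, x - obst_posx[i] - 1)
--
--         if x == obst_posx[i] and obst_posy[i] < y:
--             r1 = min(r1, y - obst_posy[i] - 1)
--
--         if x == obst_posx[i] and obst_posy[i] > y:
--             r2 = min(r2, obst_posy[i] - y - 1)
--
--         if y == obst_posy[i] and obst_posx[i] < x:
--             c1 = min(c1, x - obst_posx[i] - 1)
--
--         if y == obst_posy[i] and obst_posx[i] > x:
--             c2 = min(c2, obst_posx[i] - x - 1)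
--
--     return d11 + d12 + d21 + d22 + r1 + r2 + c1 + c2
-- ===== SOURCE B (Python) =====
-- def numberof_position_method(n, k, x, y, obst_posx, obst_posy):
--     """Direction-generic rewrite: one ray formula parameterised by the unit
--     direction vector (sx, sy) replaces the eight hard-coded branches."""
--     obs = list(zip(obst_posx[:k], obst_posy[:k]))
--     total = 0
--     for sx, sy, edge in [(-1, -1, min(x - 1, y - 1)),
--                          (1, 1, min(n - x, n - y)),
--                          (1, -1, min(n - x, y - 1)),
--                          (-1, 1, min(x - 1, n - y)),
--                          (0, -1, y - 1),
--                          (0, 1, n - y),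
--                          (-1, 0, x - 1),
--                          (1, 0, n - x)]:
--         dists = [max(abs(px - x), abs(py - y)) - 1 for (px, py) in obs
--                  if (px - x) * sy == (py - y) * sx
--                  and (px - x) * sx + (py - y) * sy > 0]
--         total += min([edge] + dists)
--     return total
-- ===== Notes on version B (the rewrite author's own statement) =====
-- stated objective: alternative
-- what changed: Replaces the single obstacle loop with eight hard-coded direction branches by one generic ray computation parameterised by the unit direction vector (sx, sy): obstacles on a ray are selected by a cross-product/dot-product test and the answer is the sum over the eight direction vectors of min(edge distance, nearest obstacle distance).
-- outside the precondition, e.g. on numberof_position_method(8, -1, 4, 4, [2, 9], [2, 9]): A returns 27, B returns 25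
import Mathlib
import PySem

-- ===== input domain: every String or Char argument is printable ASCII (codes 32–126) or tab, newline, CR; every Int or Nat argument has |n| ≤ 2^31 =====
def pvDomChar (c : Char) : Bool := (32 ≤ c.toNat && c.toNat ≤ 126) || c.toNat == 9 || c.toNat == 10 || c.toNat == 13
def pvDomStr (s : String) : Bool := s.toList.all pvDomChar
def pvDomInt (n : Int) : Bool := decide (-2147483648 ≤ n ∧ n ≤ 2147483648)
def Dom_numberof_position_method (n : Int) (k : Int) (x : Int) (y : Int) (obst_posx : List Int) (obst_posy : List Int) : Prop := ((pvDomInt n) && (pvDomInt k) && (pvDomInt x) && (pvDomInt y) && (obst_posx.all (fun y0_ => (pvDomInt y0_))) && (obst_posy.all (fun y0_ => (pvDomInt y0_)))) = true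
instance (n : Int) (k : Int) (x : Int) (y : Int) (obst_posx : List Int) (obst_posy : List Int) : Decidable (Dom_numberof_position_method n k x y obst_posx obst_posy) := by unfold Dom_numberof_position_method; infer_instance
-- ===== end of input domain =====

-- B replaces A's single loop with eight hard-coded direction branches by one generic
-- ray computation parameterised by the unit direction vector (alternative decomposition,
-- same cost). Equivalence is proved on nonnegative k with k within both obstacle lists.

-- ===== PORT A =====
-- faithful transliteration of A's loop: state = (d11, d12, d21, d22, r1, r2, c1, c2);
-- obst_posx[i]/obst_posy[i] ported as pyGetD (exact under Pre_, which puts every index in range)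
def numberof_position_method (n : Int) (k : Int) (x : Int) (y : Int) (obst_posx : List Int) (obst_posy : List Int) : Int :=
  let st : Int × Int × Int × Int × Int × Int × Int × Int :=
    (PySem.List.pyRange 0 k 1).foldl (fun s i =>
      let px := PySem.List.pyGetD obst_posx i 0
      let py := PySem.List.pyGetD obst_posy i 0
      let d11 := if x > px ∧ y > py ∧ x - px = y - py then min s.1 (x - px - 1) else s.1
      let d12 := if px > x ∧ py > y ∧ px - x = py - y then min s.2.1 (px - x - 1) else s.2.1
      let d21 := if px > x ∧ y > py ∧ px - x = y - py then min s.2.2.1 (px - x - 1) else s.2.2.1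
      let d22 := if x > px ∧ py > y ∧ x - px = py - y then min s.2.2.2.1 (x - px - 1) else s.2.2.2.1
      let r1 := if x = px ∧ py < y then min s.2.2.2.2.1 (y - py - 1) else s.2.2.2.2.1
      let r2 := if x = px ∧ py > y then min s.2.2.2.2.2.1 (py - y - 1) else s.2.2.2.2.2.1
      let c1 := if y = py ∧ px < x then min s.2.2.2.2.2.2.1 (x - px - 1) else s.2.2.2.2.2.2.1
      let c2 := if y = py ∧ px > x then min s.2.2.2.2.2.2.2 (px - x - 1) else s.2.2.2.2.2.2.2
      (d11, d12, d21, d22, r1, r2, c1, c2))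
      (min (x - 1) (y - 1), min (n - x) (n - y), min (n - x) (y - 1), min (x - 1) (n - y),
       y - 1, n - y, x - 1, n - x)
  st.1 + st.2.1 + st.2.2.1 + st.2.2.2.1 + st.2.2.2.2.1 + st.2.2.2.2.2.1 +
    st.2.2.2.2.2.2.1 + st.2.2.2.2.2.2.2

-- ===== PORT B =====
-- minimum free squares along the ray with unit direction (sx, sy):
-- min([edge] + [max(abs(px-x),abs(py-y)) - 1 for (px,py) in obs if on-ray test])
def pvRay (x y sx sy edge : Int) (obs : List (Int × Int)) : Int :=
  let dists := (obs.filter (fun p =>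
      decide ((p.1 - x) * sy = (p.2 - y) * sx) &&
      decide ((p.1 - x) * sx + (p.2 - y) * sy > 0))).map
      (fun p => max |p.1 - x| |p.2 - y| - 1)
  (PySem.List.min? (edge :: dists) (fun v => v)).getD edge

def numberof_position_method_alt (n : Int) (k : Int) (x : Int) (y : Int) (obst_posx : List Int) (obst_posy : List Int) : Int :=
  let obs := (PySem.List.slice obst_posx (some 0) (some k)).zip
             (PySem.List.slice obst_posy (some 0) (some k))
  ([((-1 : Int), (-1 : Int), min (x - 1) (y - 1)),
    (1, 1, min (n - x) (n - y)),
    (1, -1, min (n - x) (y - 1)),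
    (-1, 1, min (x - 1) (n - y)),
    (0, -1, y - 1),
    (0, 1, n - y),
    (-1, 0, x - 1),
    (1, 0, n - x)] : List (Int × Int × Int)).foldl
    (fun total t => total + pvRay x y t.1 t.2.1 t.2.2 obs) 0

-- ===== PRECONDITION & SPEC =====
-- k is an obstacle COUNT: Pre_ restricts to the natural domain 0 ≤ k ≤ both list
-- lengths. k > length makes A raise IndexError; a negative k is outside the natural
-- domain (A's empty loop there is incidental, B's negative slice means something else).
def Pre_numberof_position_method (n : Int) (k : Int) (x : Int) (y : Int) (obst_posx : List Int) (obst_posy : List Int) : Prop :=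
  0 ≤ k ∧ k ≤ obst_posx.length ∧ k ≤ obst_posy.length
instance (n : Int) (k : Int) (x : Int) (y : Int) (obst_posx : List Int) (obst_posy : List Int) : Decidable (Pre_numberof_position_method n k x y obst_posx obst_posy) := by unfold Pre_numberof_position_method; infer_instance

def pvWitness_numberof_position_method : Int × Int × Int × Int × List Int × List Int :=
  (8, 1, 4, 4, [4], [6])

def Spec_numberof_position_method (n : Int) (k : Int) (x : Int) (y : Int) (obst_posx : List Int) (obst_posy : List Int) (out : Int) : Prop := out = numberof_position_method_alt n k x y obst_posx obst_posy
instance (n : Int) (k : Int) (x : Int) (y : Int) (obst_posx : List Int) (obst_posy : List Int) (out : Int) : Decidable (Spec_numberof_position_method n k x y obst_posx obst_posy out) := by unfold Spec_numberof_position_method; infer_instance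

-- ===== CLAIM (what is proved, stated in full; the proofs are below) =====
def Claim_equal_numberof_position_method : Prop := ∀ (n : Int) (k : Int) (x : Int) (y : Int) (obst_posx : List Int) (obst_posy : List Int), Dom_numberof_position_method n k x y obst_posx obst_posy → Pre_numberof_position_method n k x y obst_posx obst_posy → Spec_numberof_position_method n k x y obst_posx obst_posy (numberof_position_method n k x y obst_posx obst_posy)

-- ===== LEMMAS AND PROOFS =====

-- pvRay as a plain min-fold over the obstacle list
theorem pvRay_eq_foldl (x y sx sy edge : Int) (obs : List (Int × Int)) :
    pvRay x y sx sy edge obs =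
      obs.foldl (fun m p =>
        if (p.1 - x) * sy = (p.2 - y) * sx ∧ (p.1 - x) * sx + (p.2 - y) * sy > 0 then
          min m (max |p.1 - x| |p.2 - y| - 1) else m) edge := by
  simp only [pvRay]
  rw [PySem.List.min?_id_cons]
  simp only [Option.getD_some, List.foldl_map, List.foldl_filter]
  apply List.foldl_ext
  intro m p _
  by_cases h : (p.1 - x) * sy = (p.2 - y) * sx ∧ (p.1 - x) * sx + (p.2 - y) * sy > 0
  · simp [h]
  · simp [h]

-- A's indexed range-loop is the same fold over the zipped k-prefixes
theorem foldl_range_getD {β : Type} (f : β → Int → Int → β) (ox oy : List Int) (k : Nat)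
    (hx : k ≤ ox.length) (hy : k ≤ oy.length) (b : β) :
    (List.range k).foldl (fun s j => f s (ox.getD j 0) (oy.getD j 0)) b =
      ((ox.take k).zip (oy.take k)).foldl (fun s p => f s p.1 p.2) b := by
  induction k generalizing b with
  | zero => simp
  | succ m ih =>
    rw [List.range_succ, List.foldl_append, ih (by omega) (by omega)]
    have h1 : ox.take (m + 1) = ox.take m ++ [ox[m]] := by
      rw [List.take_succ, List.getElem?_eq_getElem (by omega)]; simp
    have h2 : oy.take (m + 1) = oy.take m ++ [oy[m]] := by
      rw [List.take_succ, List.getElem?_eq_getElem (by omega)]; simp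
    rw [h1, h2, List.zip_append (by simp; omega), List.foldl_append]
    simp
    congr 2 <;> rw [List.getElem?_eq_getElem (by omega)] <;> rfl

-- the big decomposition: the 8-tuple fold's component sum = eight independent ray folds
theorem sum_fold_decomp (x y : Int) (obs : List (Int × Int))
    (a11 a12 a21 a22 ar1 ar2 ac1 ac2 : Int) :
    (let st := obs.foldl (fun (s : Int × Int × Int × Int × Int × Int × Int × Int) p =>
      let px := p.1
      let py := p.2
      let d11 := if x > px ∧ y > py ∧ x - px = y - py then min s.1 (x - px - 1) else s.1
      let d12 := if px > x ∧ py > y ∧ px - x = py - y then min s.2.1 (px - x - 1) else s.2.1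
      let d21 := if px > x ∧ y > py ∧ px - x = y - py then min s.2.2.1 (px - x - 1) else s.2.2.1
      let d22 := if x > px ∧ py > y ∧ x - px = py - y then min s.2.2.2.1 (x - px - 1) else s.2.2.2.1
      let r1 := if x = px ∧ py < y then min s.2.2.2.2.1 (y - py - 1) else s.2.2.2.2.1
      let r2 := if x = px ∧ py > y then min s.2.2.2.2.2.1 (py - y - 1) else s.2.2.2.2.2.1
      let c1 := if y = py ∧ px < x then min s.2.2.2.2.2.2.1 (x - px - 1) else s.2.2.2.2.2.2.1
      let c2 := if y = py ∧ px > x then min s.2.2.2.2.2.2.2 (px - x - 1) else s.2.2.2.2.2.2.2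
      (d11, d12, d21, d22, r1, r2, c1, c2))
      (a11, a12, a21, a22, ar1, ar2, ac1, ac2)
    st.1 + st.2.1 + st.2.2.1 + st.2.2.2.1 + st.2.2.2.2.1 + st.2.2.2.2.2.1 +
      st.2.2.2.2.2.2.1 + st.2.2.2.2.2.2.2) =
    pvRay x y (-1) (-1) a11 obs + pvRay x y 1 1 a12 obs + pvRay x y 1 (-1) a21 obs +
      pvRay x y (-1) 1 a22 obs + pvRay x y 0 (-1) ar1 obs + pvRay x y 0 1 ar2 obs +
      pvRay x y (-1) 0 ac1 obs + pvRay x y 1 0 ac2 obs := by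
  simp only [pvRay_eq_foldl]
  induction obs generalizing a11 a12 a21 a22 ar1 ar2 ac1 ac2 with
  | nil => simp
  | cons p t ih =>
    simp only [List.foldl_cons]
    rw [ih]
    obtain ⟨px, py⟩ := p
    congr 1
    · congr 1
      · congr 1
        · congr 1
          · congr 1
            · congr 1
              · congr 1
                · -- d11 : direction (-1,-1)
                  by_cases h : x > px ∧ y > py ∧ x - px = y - py
                  · rw [if_pos h, if_pos (by constructor <;> omega)]
                    congr 1; obtain ⟨h1, h2, h3⟩ := h
                    rw [abs_of_neg (by omega : px - x < 0), abs_of_neg (by omega : py - y < 0)]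
                    omega
                  · rw [if_neg h, if_neg (by intro ⟨h1, h2⟩; apply h; omega)]
                · -- d12 : direction (1,1)
                  by_cases h : px > x ∧ py > y ∧ px - x = py - y
                  · rw [if_pos h, if_pos (by constructor <;> omega)]
                    congr 1; obtain ⟨h1, h2, h3⟩ := h
                    rw [abs_of_pos (by omega : (0:Int) < px - x), abs_of_pos (by omega : (0:Int) < py - y)]
                    omega
                  · rw [if_neg h, if_neg (by intro ⟨h1, h2⟩; apply h; omega)]
              · -- d21 : direction (1,-1)
                by_cases h : px > x ∧ y > py ∧ px - x = y - py
                · rw [if_pos h, if_pos (by constructor <;> omega)]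
                  congr 1; obtain ⟨h1, h2, h3⟩ := h
                  rw [abs_of_pos (by omega : (0:Int) < px - x), abs_of_neg (by omega : py - y < 0)]
                  omega
                · rw [if_neg h, if_neg (by intro ⟨h1, h2⟩; apply h; omega)]
            · -- d22 : direction (-1,1)
              by_cases h : x > px ∧ py > y ∧ x - px = py - y
              · rw [if_pos h, if_pos (by constructor <;> omega)]
                congr 1; obtain ⟨h1, h2, h3⟩ := h
                rw [abs_of_neg (by omega : px - x < 0), abs_of_pos (by omega : (0:Int) < py - y)]
                omega
              · rw [if_neg h, if_neg (by intro ⟨h1, h2⟩; apply h; omega)]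
          · -- r1 : direction (0,-1)
            by_cases h : x = px ∧ py < y
            · rw [if_pos h, if_pos (by constructor <;> omega)]
              congr 1; obtain ⟨h1, h2⟩ := h
              rw [abs_of_nonneg (by omega : (0:Int) ≤ px - x), abs_of_neg (by omega : py - y < 0)]
              omega
            · rw [if_neg h, if_neg (by intro ⟨h1, h2⟩; apply h; omega)]
        · -- r2 : direction (0,1)
          by_cases h : x = px ∧ py > y
          · rw [if_pos h, if_pos (by constructor <;> omega)]
            congr 1; obtain ⟨h1, h2⟩ := h
            rw [abs_of_nonneg (by omega : (0:Int) ≤ px - x), abs_of_pos (by omega : (0:Int) < py - y)]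
            omega
          · rw [if_neg h, if_neg (by intro ⟨h1, h2⟩; apply h; omega)]
      · -- c1 : direction (-1,0)
        by_cases h : y = py ∧ px < x
        · rw [if_pos h, if_pos (by constructor <;> omega)]
          congr 1; obtain ⟨h1, h2⟩ := h
          rw [abs_of_neg (by omega : px - x < 0), abs_of_nonneg (by omega : (0:Int) ≤ py - y)]
          omega
        · rw [if_neg h, if_neg (by intro ⟨h1, h2⟩; apply h; omega)]
    · -- c2 : direction (1,0)
      by_cases h : y = py ∧ px > x
      · rw [if_pos h, if_pos (by constructor <;> omega)]
        congr 1; obtain ⟨h1, h2⟩ := h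
        rw [abs_of_pos (by omega : (0:Int) < px - x), abs_of_nonneg (by omega : (0:Int) ≤ py - y)]
        omega
      · rw [if_neg h, if_neg (by intro ⟨h1, h2⟩; apply h; omega)]

-- ===== VERDICT (by name: the statement is the Claim_ definition above) =====
theorem numberof_position_method_spec : Claim_equal_numberof_position_method := by
  intro n k x y ox oy _ hpre
  obtain ⟨hk0, hkx, hky⟩ := hpre
  unfold Spec_numberof_position_method numberof_position_method numberof_position_method_alt
  -- rewrite A's range loop as a fold over the zipped k-prefixes
  rw [PySem.List.pyRange_one, List.foldl_map]
  simp only [zero_add, PySem.List.pyGetD_natCast]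
  rw [foldl_range_getD
        (fun (s : Int × Int × Int × Int × Int × Int × Int × Int) px py =>
          let d11 := if x > px ∧ y > py ∧ x - px = y - py then min s.1 (x - px - 1) else s.1
          let d12 := if px > x ∧ py > y ∧ px - x = py - y then min s.2.1 (px - x - 1) else s.2.1
          let d21 := if px > x ∧ y > py ∧ px - x = y - py then min s.2.2.1 (px - x - 1) else s.2.2.1
          let d22 := if x > px ∧ py > y ∧ x - px = py - y then min s.2.2.2.1 (x - px - 1) else s.2.2.2.1
          let r1 := if x = px ∧ py < y then min s.2.2.2.2.1 (y - py - 1) else s.2.2.2.2.1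
          let r2 := if x = px ∧ py > y then min s.2.2.2.2.2.1 (py - y - 1) else s.2.2.2.2.2.1
          let c1 := if y = py ∧ px < x then min s.2.2.2.2.2.2.1 (x - px - 1) else s.2.2.2.2.2.2.1
          let c2 := if y = py ∧ px > x then min s.2.2.2.2.2.2.2 (px - x - 1) else s.2.2.2.2.2.2.2
          (d11, d12, d21, d22, r1, r2, c1, c2))
        ox oy ((k - 0).toNat) (by omega) (by omega)]
  -- B's slices are the same k-prefixes
  rw [PySem.List.slice_zero_start, PySem.List.slice_zero_start,
      PySem.List.slice_to ox hk0, PySem.List.slice_to oy hk0]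
  have htk : (k - 0).toNat = k.toNat := by omega
  rw [htk]
  -- decompose the tuple fold into eight ray folds and unfold B's 8-element direction loop
  have := sum_fold_decomp x y ((ox.take k.toNat).zip (oy.take k.toNat))
    (min (x - 1) (y - 1)) (min (n - x) (n - y)) (min (n - x) (y - 1)) (min (x - 1) (n - y))
    (y - 1) (n - y) (x - 1) (n - x)
  simp only [List.foldl_cons, List.foldl_nil] at this ⊢
  rw [this]
  ring
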